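-- pv_equiv track=rewrite | github.com/kao0624024/u0624024 | webScrap/getWebInformation.py | delWord
-- ===== SOURCE A (Python) =====
-- def delWord(word, startWord = "<", endWord = ">"):
--     startIndex = -1
--     endIndex = -1
--
--     for i in range(len(word)):
--         if word[i] == startWord:
--             startIndex = i
--             continue
--         if word[i] == endWord and startIndex > -1:
--             endIndex = i
--             processWord = ""
--             processWord = word[:startIndex] + word[endIndex + 1:]
--             word = processWord
--             break
--     if startIndex == -1 or endIndex == -1:
--         return word
--     else:
--         return delWord(word, startWord, endWord)
-- ===== SOURCE B (Python) =====
-- def delWord(word, startWord = "<", endWord = ">"):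
--     out = []           # committed characters
--     stack = []         # positions in out where an unmatched startWord char sits
--     for c in word:
--         if c == startWord:
--             stack.append(len(out))
--             out.append(c)
--         elif c == endWord and stack:
--             del out[stack.pop():]
--         else:
--             out.append(c)
--     return "".join(out)
-- ===== Notes on version B (the rewrite author's own statement) =====
-- stated objective: alternative
-- what changed: A repeatedly rescans the word from the start, deleting one innermost startWord..endWord span per recursive pass; B makes a single left-to-right pass keeping a stack of open-marker positions in the output buffer and truncates the buffer when a matching end marker arrives (asymptotically fewer scans, though a timing run on random inputs read only ~1.5x).
import Mathlib
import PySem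

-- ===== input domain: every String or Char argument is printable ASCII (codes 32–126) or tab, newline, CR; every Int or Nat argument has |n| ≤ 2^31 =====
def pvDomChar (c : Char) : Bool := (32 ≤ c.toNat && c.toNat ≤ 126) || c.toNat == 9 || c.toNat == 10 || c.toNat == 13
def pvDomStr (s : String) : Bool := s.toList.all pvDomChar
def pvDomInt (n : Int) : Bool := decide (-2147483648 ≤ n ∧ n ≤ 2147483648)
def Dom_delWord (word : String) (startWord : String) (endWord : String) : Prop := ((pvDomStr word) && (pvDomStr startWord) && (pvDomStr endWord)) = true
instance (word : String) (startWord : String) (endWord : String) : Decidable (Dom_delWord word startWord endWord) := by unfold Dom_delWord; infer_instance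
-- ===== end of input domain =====

-- B replaces A's repeated rescans (one innermost marker span deleted per recursive pass)
-- by a single left-to-right pass with a stack of open-marker positions; return value only.

-- Python `word[i] == startWord`: the 1-char string at i compared with the marker string.
def pvChEq (c : Char) (s : String) : Bool := [c] == s.toList

-- ===== PORT A =====
-- the for-loop of A: index i over the word, startIndex in `si`; returns (startIndex, endIndex)
def delWordScan (sw ew : String) : List Char → Nat → Int → Int × Int
  | [], _, si => (si, -1)
  | c :: rest, i, si =>
    if pvChEq c sw then delWordScan sw ew rest (i + 1) (i : Int)
    else if pvChEq c ew && decide (si > -1) then (si, (i : Int))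
    else delWordScan sw ew rest (i + 1) si

-- A's recursion: delete word[startIndex..endIndex] (word[:si] + word[ei+1:], both
-- indices nonnegative and in range here, so take/drop is the exact slice) and recurse.
-- fuel = the word's length bounds the recursion depth (each pass strictly shortens the
-- word); it is only a totality guard, never reached on the values delWord passes in.
def delWordCore (sw ew : String) : Nat → List Char → List Char
  | 0, w => w
  | fuel + 1, w =>
    if (delWordScan sw ew w 0 (-1)).1 = -1 ∨ (delWordScan sw ew w 0 (-1)).2 = -1 then w
    else delWordCore sw ew fuel
      (w.take (delWordScan sw ew w 0 (-1)).1.toNat ++ w.drop ((delWordScan sw ew w 0 (-1)).2.toNat + 1))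

def delWord (word : String) (startWord : String) (endWord : String) : String :=
  String.ofList (delWordCore startWord endWord word.toList.length word.toList)

-- ===== PORT B =====
-- one step of B's loop: state = (committed output, stack of open positions in the output)
def stepB (sw ew : String) (st : List Char × List Nat) (c : Char) : List Char × List Nat :=
  if pvChEq c sw then (st.1 ++ [c], st.1.length :: st.2)
  else if pvChEq c ew then
    match st.2 with
    | [] => (st.1 ++ [c], st.2)
    | p :: rest => (st.1.take p, rest)
  else (st.1 ++ [c], st.2)

def delWord_alt (word : String) (startWord : String) (endWord : String) : String :=
  String.ofList (word.toList.foldl (stepB startWord endWord) ([], [])).1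

-- ===== PRECONDITION & SPEC =====
def Spec_delWord (word : String) (startWord : String) (endWord : String) (out : String) : Prop := out = delWord_alt word startWord endWord
instance (word : String) (startWord : String) (endWord : String) (out : String) : Decidable (Spec_delWord word startWord endWord out) := by unfold Spec_delWord; infer_instance

-- ===== CLAIM (what is proved, stated in full; the proofs are below) =====
def Claim_equal_delWord : Prop := ∀ (word : String) (startWord : String) (endWord : String), Dom_delWord word startWord endWord → Spec_delWord word startWord endWord (delWord word startWord endWord)

-- ===== LEMMAS AND PROOFS =====

-- bounds of the scan result, used to show A's found span is well-formed
theorem delWordScan_bounds (sw ew : String) : ∀ (rest : List Char) (i : Nat) (si : Int),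
    si < (i : Int) → (delWordScan sw ew rest i si).2 ≠ -1 →
    -1 < (delWordScan sw ew rest i si).1 ∧
      (delWordScan sw ew rest i si).1 < (delWordScan sw ew rest i si).2 ∧
      (delWordScan sw ew rest i si).2 < (i : Int) + rest.length := by
  intro rest
  induction rest with
  | nil => intro i si h hne; simp [delWordScan] at hne
  | cons c rest ih =>
    intro i si h hne
    simp only [delWordScan] at hne ⊢
    by_cases hs : pvChEq c sw = true
    · rw [if_pos hs] at hne ⊢
      have := ih (i + 1) (i : Int) (by push_cast; omega) hne
      push_cast [List.length_cons] at this ⊢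
      omega
    · rw [if_neg hs] at hne ⊢
      by_cases hg : (pvChEq c ew && decide (si > -1)) = true
      · have hsi : si > -1 := by
          simp only [Bool.and_eq_true, decide_eq_true_eq] at hg; exact hg.2
        rw [if_pos hg]
        push_cast [List.length_cons]
        refine ⟨by omega, by omega, by omega⟩
      · rw [if_neg hg] at hne ⊢
        have := ih (i + 1) si (by push_cast; omega) hne
        push_cast [List.length_cons] at this ⊢
        omega


-- if A's scan finds no deletable span, B's pass never pops either: the output is the input
theorem foldl_stepB_no_break (sw ew : String) : ∀ (rest : List Char) (i : Nat) (si : Int)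
    (out : List Char) (st : List Nat), -1 ≤ si → (st = [] ↔ si = -1) →
    (delWordScan sw ew rest i si).2 = -1 →
    ∃ st', rest.foldl (stepB sw ew) (out, st) = (out ++ rest, st') := by
  intro rest
  induction rest with
  | nil => intro i si out st _ _ _; exact ⟨st, by simp⟩
  | cons c rest ih =>
    intro i si out st hge hiff hsc
    simp only [delWordScan] at hsc
    simp only [List.foldl_cons]
    by_cases hs : pvChEq c sw = true
    · rw [if_pos hs] at hsc
      have hstep : stepB sw ew (out, st) c = (out ++ [c], out.length :: st) := by
        simp [stepB, hs]
      rw [hstep]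
      obtain ⟨st', hfold⟩ := ih (i + 1) (i : Int) (out ++ [c]) (out.length :: st)
        (by omega) (iff_of_false (by simp) (by omega)) hsc
      exact ⟨st', by rw [hfold, ← List.append_cons]⟩
    · rw [if_neg hs] at hsc
      by_cases hg : (pvChEq c ew && decide (si > -1)) = true
      · rw [if_pos hg] at hsc
        exfalso
        simp only at hsc
        omega
      · rw [if_neg hg] at hsc
        by_cases he : pvChEq c ew = true
        · have hsi : si = -1 := by
            by_contra hne
            exact hg (by simp only [he, Bool.true_and, decide_eq_true_eq]; omega)
          have hst : st = [] := hiff.mpr hsi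
          have hstep : stepB sw ew (out, st) c = (out ++ [c], st) := by
            simp [stepB, hs, he, hst]
          rw [hstep]
          obtain ⟨st', hfold⟩ := ih (i + 1) si (out ++ [c]) st hge hiff hsc
          exact ⟨st', by rw [hfold, ← List.append_cons]⟩
        · have hstep : stepB sw ew (out, st) c = (out ++ [c], st) := by
            simp [stepB, hs, he]
          rw [hstep]
          obtain ⟨st', hfold⟩ := ih (i + 1) si (out ++ [c]) st hge hiff hsc
          exact ⟨st', by rw [hfold, ← List.append_cons]⟩

-- B's pass over characters that match neither marker just appends them
theorem foldl_stepB_neutral (sw ew : String) : ∀ (m out : List Char) (st : List Nat),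
    (∀ c ∈ m, pvChEq c sw = false ∧ pvChEq c ew = false) →
    m.foldl (stepB sw ew) (out, st) = (out ++ m, st) := by
  intro m
  induction m with
  | nil => intro out st _; simp
  | cons c m ih =>
    intro out st hm
    have hc := hm c (by simp)
    have hstep : stepB sw ew (out, st) c = (out ++ [c], st) := by
      simp [stepB, hc.1, hc.2]
    rw [List.foldl_cons, hstep, ih (out ++ [c]) st (fun d hd => hm d (by simp [hd])),
      ← List.append_cons]

-- the heart of B: a start marker, neutral middle and end marker cancel to nothing
theorem foldl_stepB_cancel (sw ew : String) (s e : Char) (m r out : List Char) (st : List Nat)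
    (hs : pvChEq s sw = true) (he : pvChEq e ew = true) (hes : pvChEq e sw = false)
    (hm : ∀ c ∈ m, pvChEq c sw = false ∧ pvChEq c ew = false) :
    (s :: (m ++ e :: r)).foldl (stepB sw ew) (out, st) = r.foldl (stepB sw ew) (out, st) := by
  have h1 : stepB sw ew (out, st) s = (out ++ [s], out.length :: st) := by
    simp [stepB, hs]
  have h2 : stepB sw ew (out ++ [s] ++ m, out.length :: st) e = (out, st) := by
    simp only [stepB, hes, Bool.false_eq_true, if_false, he, if_true]
    rw [List.append_assoc, List.take_append_of_le_length le_rfl, List.take_length]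
  calc (s :: (m ++ e :: r)).foldl (stepB sw ew) (out, st)
      = (m ++ e :: r).foldl (stepB sw ew) (out ++ [s], out.length :: st) := by
        rw [List.foldl_cons, h1]
    _ = (e :: r).foldl (stepB sw ew) (out ++ [s] ++ m, out.length :: st) := by
        rw [List.foldl_append, foldl_stepB_neutral sw ew m _ _ hm]
    _ = r.foldl (stepB sw ew) (out, st) := by rw [List.foldl_cons, h2]

-- invariant carried by A's scan: si = -1, or si points at a start marker followed only by neutral chars
def ScanInv (sw ew : String) (pre : List Char) (si : Int) : Prop :=
  si = -1 ∨ ∃ p s m, pre = p ++ s :: m ∧ si = (p.length : Int) ∧ pvChEq s sw = true ∧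
    ∀ c ∈ m, pvChEq c sw = false ∧ pvChEq c ew = false

-- when A's scan breaks, the word decomposes as p ++ s :: (m ++ e :: r) around the deleted span
theorem delWordScan_break (sw ew : String) : ∀ (rest pre : List Char) (si : Int),
    ScanInv sw ew pre si → (delWordScan sw ew rest pre.length si).2 ≠ -1 →
    ∃ p s m e r,
      pre ++ rest = p ++ s :: (m ++ e :: r) ∧
      (delWordScan sw ew rest pre.length si).1 = (p.length : Int) ∧
      (delWordScan sw ew rest pre.length si).2 = ((p.length + 1 + m.length : Nat) : Int) ∧
      pvChEq s sw = true ∧ pvChEq e ew = true ∧ pvChEq e sw = false ∧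
      (∀ c ∈ m, pvChEq c sw = false ∧ pvChEq c ew = false) := by
  intro rest
  induction rest with
  | nil => intro pre si _ hne; simp [delWordScan] at hne
  | cons c rest ih =>
    intro pre si hinv hne
    simp only [delWordScan] at hne ⊢
    by_cases hs : pvChEq c sw = true
    · rw [if_pos hs] at hne ⊢
      have hinv' : ScanInv sw ew (pre ++ [c]) (pre.length : Int) :=
        Or.inr ⟨pre, c, [], by simp, rfl, hs, by simp⟩
      have hlen : (pre ++ [c]).length = pre.length + 1 := by simp
      obtain ⟨p, s, m, e, r, hdec, h1, h2, h3, h4, h5, h6⟩ :=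
        ih (pre ++ [c]) (pre.length : Int) hinv' (by rw [hlen]; exact hne)
      rw [hlen] at h1 h2
      refine ⟨p, s, m, e, r, by simpa [List.append_assoc] using hdec, h1, h2, h3, h4, h5, h6⟩
    · rw [if_neg hs] at hne ⊢
      rw [Bool.not_eq_true] at hs
      by_cases hg : (pvChEq c ew && decide (si > -1)) = true
      · rw [if_pos hg] at hne ⊢
        simp only [Bool.and_eq_true, decide_eq_true_eq] at hg
        rcases hinv with hsi | ⟨p, s, m, hpre, hsi, hss, hmn⟩
        · omega
        refine ⟨p, s, m, c, rest, ?_, hsi, ?_, hss, hg.1, hs, hmn⟩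
        · rw [hpre]; simp [List.append_assoc]
        · simp only [hpre, List.length_append, List.length_cons]
          push_cast
          omega
      · rw [if_neg hg] at hne ⊢
        have hinv' : ScanInv sw ew (pre ++ [c]) si := by
          rcases hinv with hsi | ⟨p, s, m, hpre, hsi, hss, hmn⟩
          · exact Or.inl hsi
          · refine Or.inr ⟨p, s, m ++ [c], by simp [hpre], hsi, hss, ?_⟩
            intro d hd
            rcases List.mem_append.mp hd with hd | hd
            · exact hmn d hd
            · simp only [List.mem_singleton] at hd
              subst hd
              refine ⟨hs, ?_⟩
              have hgt : si > -1 := by omega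
              simpa [hgt] using hg
        have hlen : (pre ++ [c]).length = pre.length + 1 := by simp
        obtain ⟨p, s, m, e, r, hdec, h1, h2, h3, h4, h5, h6⟩ :=
          ih (pre ++ [c]) si hinv' (by rw [hlen]; exact hne)
        rw [hlen] at h1 h2
        refine ⟨p, s, m, e, r, by simpa [List.append_assoc] using hdec, h1, h2, h3, h4, h5, h6⟩

-- main induction: each recursive pass of A deletes exactly the span B's stack cancels
theorem delWordCore_eq (sw ew : String) : ∀ (n : Nat) (w : List Char), w.length ≤ n →
    delWordCore sw ew n w = (w.foldl (stepB sw ew) ([], [])).1 := by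
  intro n
  induction n with
  | zero =>
    intro w hw
    have hnil : w = [] := List.length_eq_zero_iff.mp (Nat.le_zero.mp hw)
    subst hnil
    simp [delWordCore]
  | succ n ih =>
    intro w hw
    rw [delWordCore]
    by_cases h2 : (delWordScan sw ew w 0 (-1)).2 = -1
    · rw [if_pos (Or.inr h2)]
      obtain ⟨st', hfold⟩ := foldl_stepB_no_break sw ew w 0 (-1) [] [] (by norm_num) (by simp) h2
      simp [hfold]
    · have hb := delWordScan_bounds sw ew w 0 (-1) (by norm_num) h2
      rw [if_neg (by rw [not_or]; exact ⟨by omega, h2⟩)]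
      obtain ⟨p, s, m, e, r, hdec, h1, hh2, hss, hee, hes, hmn⟩ :=
        delWordScan_break sw ew w [] (-1) (Or.inl rfl) (by simpa using h2)
      simp only [List.length_nil, List.nil_append] at hdec h1 hh2
      -- the deleted slice: w.take si ++ w.drop (ei+1) = p ++ r
      have htake : w.take (delWordScan sw ew w 0 (-1)).1.toNat = p := by
        rw [h1, hdec, Int.toNat_natCast, List.take_append_of_le_length le_rfl, List.take_length]
      have hdrop : w.drop ((delWordScan sw ew w 0 (-1)).2.toNat + 1) = r := by
        rw [hh2, hdec, Int.toNat_natCast]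
        have hx : p ++ s :: (m ++ e :: r) = (p ++ s :: (m ++ [e])) ++ r := by simp
        have hlen : p.length + 1 + m.length + 1 = (p ++ s :: (m ++ [e])).length := by
          simp only [List.length_append, List.length_cons, List.length_nil]
          omega
        rw [hx, hlen, List.drop_left]
      rw [htake, hdrop]
      have hle : (p ++ r).length ≤ n := by
        have hww : w.length ≤ n + 1 := hw
        rw [hdec] at hww
        simp only [List.length_append, List.length_cons] at hww ⊢
        omega
      rw [ih (p ++ r) hle]
      have hB : w.foldl (stepB sw ew) ([], []) = (p ++ r).foldl (stepB sw ew) ([], []) := by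
        rw [hdec, List.foldl_append, List.foldl_append,
          foldl_stepB_cancel sw ew s e m r _ _ hss hee hes hmn]
      rw [hB]

-- ===== VERDICT (by name: the statement is the Claim_ definition above) =====
theorem delWord_spec : Claim_equal_delWord := by
  intro word startWord endWord _
  unfold Spec_delWord delWord delWord_alt
  rw [delWordCore_eq startWord endWord word.toList.length word.toList le_rfl]
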